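-- pv_equiv track=rewrite | github.com/somekindofpast/py-bites-regular-bites | string/split_once_delimit_many.py | split_once
-- ===== SOURCE A (Python) =====
-- from typing import List
--
-- def split_once(text: str, separators: str = None) -> List[str]:
--     if text == "":
--         return ['']
--     if not separators:
--         separators = "\t\n\v\f\r "
--
--     res = []
--     while True:
--         if text == "":
--             break
--         for i in range(len(text)):
--             char = text[i]
--             if char in separators:
--                 res.append((text[:i]))
--                 text = text[(i + 1):] if i < len(text) - 1 else ""
--                 separators = separators.replace(char, '')
--                 break
--             if i == len(text) - 1:
--                 res.append(text)
--                 text = ""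
--     return res
-- ===== SOURCE B (Python) =====
-- from typing import List
--
-- def split_once(text: str, separators: str = None) -> List[str]:
--     if text == "":
--         return ['']
--     active = set(separators) if separators else set("\t\n\v\f\r ")
--     res = []
--     start = 0
--     for i, ch in enumerate(text):
--         if ch in active:
--             res.append(text[start:i])
--             active.discard(ch)
--             start = i + 1
--     if start < len(text):
--         res.append(text[start:])
--     return res
-- ===== Notes on version B (the rewrite author's own statement) =====
-- stated objective: faster
-- what changed: Replaces the restart-the-scan-after-every-cut while/for loop with repeated string slicing and separator-string rewriting by a single left-to-right pass keeping a start index and a mutable set of still-active separator characters.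
import Mathlib
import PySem

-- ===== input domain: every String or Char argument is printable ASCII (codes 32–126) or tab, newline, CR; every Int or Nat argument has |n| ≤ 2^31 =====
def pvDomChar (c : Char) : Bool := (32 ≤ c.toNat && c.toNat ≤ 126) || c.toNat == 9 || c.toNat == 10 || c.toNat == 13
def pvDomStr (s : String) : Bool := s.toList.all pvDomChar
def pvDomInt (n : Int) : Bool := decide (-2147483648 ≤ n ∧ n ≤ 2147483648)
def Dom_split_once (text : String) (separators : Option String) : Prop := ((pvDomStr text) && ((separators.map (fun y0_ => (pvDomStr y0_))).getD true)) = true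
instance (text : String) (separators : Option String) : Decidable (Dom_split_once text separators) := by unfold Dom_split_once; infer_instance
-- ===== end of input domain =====

-- B replaces A's restart-after-every-cut scan (re-slicing text and rewriting the separator
-- string at each cut) by one left-to-right pass with a start index and a set of active
-- separators. Return values only (A mutates no argument). Both ports work on text.toList;
-- slices are ported as take/drop, exact here since all indices involved are in [0, length].

-- ===== PORT A =====
-- inner 'for i in range(len(text))': returns the first (i, char) with char in separators,
-- none when the loop ends via the 'i == len(text) - 1' branch (no separator found).
def pvInnerA : List Char → List Char → Nat → Option (Nat × Char)
  | [], _, _ => none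
  | c :: rest, seps, i => if c ∈ seps then some (i, c) else pvInnerA rest seps (i + 1)

-- the 'while True' loop; res.append becomes the cons, text/separators reassignment the
-- recursive call.  text[:i] = take i, text[(i+1):] (also when i = len-1, where Python takes "")
-- = drop (i+1), separators.replace(char, '') = filter (· ≠ char).
def pvLoopA (text : List Char) (seps : List Char) : List String :=
  match _h : text with
  | [] => []
  | c0 :: t0 =>
    match pvInnerA (c0 :: t0) seps 0 with
    | some (i, c) =>
        String.ofList ((c0 :: t0).take i) ::
          pvLoopA ((c0 :: t0).drop (i + 1)) (seps.filter (fun x => x ≠ c))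
    | none => [String.ofList (c0 :: t0)]
  termination_by text.length
  decreasing_by simp

def split_once (text : String) (separators : Option String) : List String :=
  if text = "" then [""]
  else
    -- 'if not separators:' — None or "" both replaced by the default whitespace string
    let seps : List Char :=
      match separators with
      | none => "\t\n\x0B\x0C\r ".toList
      | some s => if s = "" then "\t\n\x0B\x0C\r ".toList else s.toList
    pvLoopA text.toList seps

-- ===== PORT B =====
-- 'for i, ch in enumerate(text)': structural recursion over the remaining characters,
-- carrying i, the active set, the start index and res.  text[start:i] = (drop start).take
-- (i - start), text[start:] = drop start — exact since 0 ≤ start ≤ i ≤ len(text).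
def pvLoopB (rest : List Char) (i : Nat) (full : List Char) (active : PySem.Set Char)
    (start : Nat) (res : List String) : List String :=
  match rest with
  | [] => if start < full.length then res ++ [String.ofList (full.drop start)] else res
  | c :: rs =>
      if PySem.Set.contains active c then
        pvLoopB rs (i + 1) full (PySem.Set.discard active c) (i + 1)
          (res ++ [String.ofList ((full.drop start).take (i - start))])
      else
        pvLoopB rs (i + 1) full active start res

def split_once_alt (text : String) (separators : Option String) : List String :=
  if text = "" then [""]
  else
    let active : PySem.Set Char :=
      match separators with
      | none => PySem.Set.ofList "\t\n\x0B\x0C\r ".toList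
      | some s => if s = "" then PySem.Set.ofList "\t\n\x0B\x0C\r ".toList
                  else PySem.Set.ofList s.toList
    pvLoopB text.toList 0 text.toList active 0 []

-- ===== PRECONDITION & SPEC =====
def Spec_split_once (text : String) (separators : Option String) (out : List String) : Prop := out = split_once_alt text separators
instance (text : String) (separators : Option String) (out : List String) : Decidable (Spec_split_once text separators out) := by unfold Spec_split_once; infer_instance

-- ===== CLAIM (what is proved, stated in full; the proofs are below) =====
def Claim_equal_split_once : Prop := ∀ (text : String) (separators : Option String), Dom_split_once text separators → Spec_split_once text separators (split_once text separators)

-- ===== LEMMAS AND PROOFS =====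

-- A's inner scan returns none when no character of the text is an active separator
theorem pvInnerA_none (l seps : List Char) (i : Nat) (h : ∀ x ∈ l, x ∉ seps) :
    pvInnerA l seps i = none := by
  induction l generalizing i with
  | nil => rfl
  | cons c rest ih =>
      simp only [pvInnerA]
      rw [if_neg (h c (by simp))]
      exact ih _ (fun x hx => h x (by simp [hx]))

-- A's inner scan finds the first active separator
theorem pvInnerA_find (pre rs seps : List Char) (c : Char) (i : Nat)
    (hpre : ∀ x ∈ pre, x ∉ seps) (hc : c ∈ seps) :
    pvInnerA (pre ++ c :: rs) seps i = some (i + pre.length, c) := by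
  induction pre generalizing i with
  | nil => simp [pvInnerA, hc]
  | cons p ps ih =>
      simp only [List.cons_append, pvInnerA]
      rw [if_neg (hpre p (by simp))]
      rw [ih (i + 1) (fun x hx => hpre x (by simp [hx]))]
      simp
      omega

-- the main loop invariant: B at position start + |pre| (with the characters of pre, none of
-- them active, already skipped since the last cut at start) produces res ++ A's answer for
-- the remaining text pre ++ cur, whenever A's separator string and B's active set agree as sets
theorem pvLoop_eq (cur : List Char) : ∀ (pre full seps : List Char)
    (active : PySem.Set Char) (start : Nat) (res : List String),
    full.drop start = pre ++ cur →
    (∀ x ∈ pre, x ∉ seps) →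
    (∀ x, x ∈ seps ↔ PySem.Set.contains active x = true) →
    pvLoopB cur (start + pre.length) full active start res = res ++ pvLoopA (pre ++ cur) seps := by
  induction cur with
  | nil =>
      intro pre full seps active start res hdrop hpre _hmem
      simp only [List.append_nil] at hdrop ⊢
      simp only [pvLoopB]
      by_cases hlt : start < full.length
      · have hne : pre ≠ [] := by
          intro h; rw [h] at hdrop
          have := List.length_drop (l := full) (i := start)
          rw [hdrop] at this; simp at this; omega
        obtain ⟨c0, t0, rfl⟩ := List.exists_cons_of_ne_nil hne
        rw [if_pos hlt, hdrop, pvLoopA, pvInnerA_none _ _ _ hpre]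
      · have : pre = [] := by
          have := List.length_drop (l := full) (i := start)
          rw [hdrop] at this
          cases pre with
          | nil => rfl
          | cons a b => simp at this; omega
        subst this
        rw [if_neg hlt, pvLoopA]
        simp
  | cons c rs ih =>
      intro pre full seps active start res hdrop hpre hmem
      simp only [pvLoopB]
      have htake : (full.drop start).take pre.length = pre := by
        rw [hdrop]; simp
      have hdrop2 : full.drop (start + pre.length + 1) = rs := by
        have he : start + pre.length + 1 = start + (pre.length + 1) := by omega
        rw [he, ← List.drop_drop, hdrop]
        simp
      by_cases hc : c ∈ seps
      · rw [if_pos ((hmem c).mp hc)]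
        have hA : pvLoopA (pre ++ c :: rs) seps =
            String.ofList pre ::
              pvLoopA rs (seps.filter (fun x => x ≠ c)) := by
          have hne : pre ++ c :: rs ≠ [] := by simp
          obtain ⟨c0, t0, he⟩ := List.exists_cons_of_ne_nil hne
          rw [he, pvLoopA, ← he, pvInnerA_find pre rs seps c 0 hpre hc]
          simp
        rw [hA]
        have hsub : start + pre.length - start = pre.length := by omega
        rw [hsub, htake]
        have := ih [] full (seps.filter (fun x => x ≠ c)) (PySem.Set.discard active c)
          (start + pre.length + 1) (res ++ [String.ofList pre])
          (by simpa using hdrop2) (by simp)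
          (by intro x
              have h1 := (hmem x).symm
              rw [PySem.Set.contains, List.contains_iff_mem] at h1
              simp [PySem.Set.contains, PySem.Set.discard, List.mem_filter, h1])
        simp only [List.length_nil, Nat.add_zero, List.nil_append] at this
        rw [this]
        simp
      · rw [if_neg (fun h => hc ((hmem c).mpr h))]
        have := ih (pre ++ [c]) full seps active start res
          (by rw [hdrop]; simp) 
          (by intro x hx
              rcases List.mem_append.mp hx with h | h
              · exact hpre x h
              · simp at h; subst h; exact hc)
          hmem
        simp only [List.length_append, List.length_singleton, List.append_assoc,
          List.singleton_append, ← Nat.add_assoc] at this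
        exact this

-- the separator string A starts with and the set B starts with agree as sets
theorem pv_start_mem (l : List Char) (x : Char) :
    x ∈ l ↔ PySem.Set.contains (PySem.Set.ofList l) x = true := by
  simp [PySem.Set.contains, PySem.Set.mem_ofList]

-- ===== VERDICT (by name: the statement is the Claim_ definition above) =====
theorem split_once_spec : Claim_equal_split_once := by
  unfold Claim_equal_split_once
  intro text separators _hdom
  unfold Spec_split_once split_once split_once_alt
  by_cases ht : text = ""
  · simp [ht]
  · rw [if_neg ht, if_neg ht]
    have key : ∀ (l : List Char),
        pvLoopB text.toList 0 text.toList (PySem.Set.ofList l) 0 [] =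
          pvLoopA text.toList l := by
      intro l
      have := pvLoop_eq text.toList [] text.toList l (PySem.Set.ofList l) 0 []
        (by simp) (by simp) (fun x => pv_start_mem l x)
      simpa using this
    cases separators with
    | none => simp [key]
    | some s =>
        by_cases hs : s = "" <;> simp [hs, key]
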